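-- pv_equiv track=rewrite | github.com/lmy6268/ky_algorithm | 251027/유사칸토어비트열/PG_유사칸토어비트열.py | solution
-- ===== SOURCE A (Python) =====
-- def solution(n, l, r):
--     answer = 0
--
--     for i in range(l-1,r):
--         while i>0:
--             # i % 5 == 2 인 위치에 있는 경우,
--             # 0이 해당 위치에 존재함.
--             # (계속해서 5개의 섹션으로 나누며, 가운데 즉, 2번 인덱스 위치에 있는지 확인 )
--             if i % 5 != 2:
--                 i//=5
--             else:
--                 break
--
--         #1인 경우
--         if i == 0:
--             answer +=1
--
--     return answer
-- ===== SOURCE B (Python) =====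
-- # Digit-counting: f(x) = how many i in [0, x) have no base-5 digit equal to 2;
-- # answer = f(hi) - f(lo) over the clamped interval [max(l-1,0), max(r, lo)).
-- CNT = [0, 1, 2, 2, 3]  # allowed digits (0,1,3,4) strictly below d, for d in 0..4
--
--
-- def _good(x):
--     if x <= 0:
--         return True
--     return x % 5 != 2 and _good(x // 5)
--
--
-- def _f(x):
--     if x <= 0:
--         return 0
--     q, d = divmod(x, 5)
--     return 4 * _f(q) + (CNT[d] if _good(q) else 0)
--
--
-- def solution(n, l, r):
--     lo = max(l - 1, 0)
--     hi = max(r, lo)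
--     return _f(hi) - _f(lo)
-- ===== Notes on version B (the rewrite author's own statement) =====
-- stated objective: faster
-- what changed: Replaces A's per-number base-5 digit scan over every i in range(l-1, r) with a digit-DP counting function f(x) = #{0 <= i < x without base-5 digit 2}, returning f(hi) - f(lo) at the clamped interval ends.
import Mathlib
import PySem

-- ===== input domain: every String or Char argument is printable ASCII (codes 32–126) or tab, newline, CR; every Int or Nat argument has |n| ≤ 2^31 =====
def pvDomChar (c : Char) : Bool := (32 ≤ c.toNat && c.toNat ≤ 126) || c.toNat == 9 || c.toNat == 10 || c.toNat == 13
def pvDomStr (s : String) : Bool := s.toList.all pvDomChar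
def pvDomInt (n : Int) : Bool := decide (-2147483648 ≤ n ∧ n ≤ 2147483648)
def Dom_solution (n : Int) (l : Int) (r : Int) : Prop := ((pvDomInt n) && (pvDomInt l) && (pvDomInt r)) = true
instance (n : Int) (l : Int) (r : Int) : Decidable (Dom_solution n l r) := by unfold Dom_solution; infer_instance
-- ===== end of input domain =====

-- B replaces A's per-number digit scan over the whole range by a base-5 digit-counting
-- function f (count of numbers below x with no base-5 digit 2) evaluated at both ends: faster (asymptotic).


-- ===== PORT A =====
-- A's inner 'while i>0: if i%5!=2: i//=5 else: break' as a recursive helper returning the final i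
def pvADrop (i : Int) : Int :=
  if h : 0 < i then
    (if PySem.Int.mod i 5 ≠ 2 then pvADrop (PySem.Int.floordiv i 5) else i)
  else i
termination_by i.toNat
decreasing_by
  have := PySem.Int.floordiv_lt_iff_lt_mul (a := i) (q := i) (b := 5) (by omega)
  have h2 : 0 ≤ PySem.Int.floordiv i 5 := by
    have := PySem.Int.le_floordiv_iff_mul_le (a := i) (q := 0) (b := 5) (by omega)
    omega
  omega

def solution (n : Int) (l : Int) (r : Int) : Int :=
  (PySem.List.pyRange (l - 1) r 1).foldl
    (fun answer i => if pvADrop i = 0 then answer + 1 else answer) 0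

-- ===== PORT B =====
def pvGood (x : Int) : Bool :=
  if h : x ≤ 0 then true
  else (decide (PySem.Int.mod x 5 ≠ 2)) && pvGood (PySem.Int.floordiv x 5)
termination_by x.toNat
decreasing_by
  have := PySem.Int.floordiv_lt_iff_lt_mul (a := x) (q := x) (b := 5) (by omega)
  have h2 : 0 ≤ PySem.Int.floordiv x 5 := by
    have := PySem.Int.le_floordiv_iff_mul_le (a := x) (q := 0) (b := 5) (by omega)
    omega
  omega

-- CNT[d] ported with pyGet?/getD 0; exact since 0 ≤ d < 5 whenever it is reached
def pvF (x : Int) : Int :=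
  if h : x ≤ 0 then 0
  else
    let q := PySem.Int.floordiv x 5
    let d := PySem.Int.mod x 5
    4 * pvF q + (if pvGood q then (PySem.List.pyGet? ([0, 1, 2, 2, 3] : List Int) d).getD 0 else 0)
termination_by x.toNat
decreasing_by
  have := PySem.Int.floordiv_lt_iff_lt_mul (a := x) (q := x) (b := 5) (by omega)
  have h2 : 0 ≤ PySem.Int.floordiv x 5 := by
    have := PySem.Int.le_floordiv_iff_mul_le (a := x) (q := 0) (b := 5) (by omega)
    omega
  omega

def solution_alt (n : Int) (l : Int) (r : Int) : Int :=
  let lo := max (l - 1) 0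
  let hi := max r lo
  pvF hi - pvF lo

-- ===== PRECONDITION & SPEC =====
def Spec_solution (n : Int) (l : Int) (r : Int) (out : Int) : Prop := out = solution_alt n l r
instance (n : Int) (l : Int) (r : Int) (out : Int) : Decidable (Spec_solution n l r out) := by unfold Spec_solution; infer_instance

-- ===== CLAIM (what is proved, stated in full; the proofs are below) =====
def Claim_equal_solution : Prop := ∀ (n : Int) (l : Int) (r : Int), Dom_solution n l r → Spec_solution n l r (solution n l r)

-- ===== LEMMAS AND PROOFS =====

-- G n : n has no base-5 digit 2 (Nat level)
def pvG (m : Nat) : Bool :=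
  if m = 0 then true else (decide (m % 5 ≠ 2)) && pvG (m / 5)

-- C m : how many i < m satisfy pvG
def pvC (m : Nat) : Nat := (List.range m).countP pvG

theorem pvG_zero : pvG 0 = true := by simp [pvG]

theorem pvG_digit (q b : Nat) (hb : b < 5) : pvG (5 * q + b) = ((decide (b ≠ 2)) && pvG q) := by
  by_cases h0 : 5 * q + b = 0
  · have hq : q = 0 := by omega
    have hb0 : b = 0 := by omega
    subst hq hb0; simp [pvG]
  · rw [pvG, if_neg h0]
    have hm : (5 * q + b) % 5 = b := by omega
    have hd : (5 * q + b) / 5 = q := by omega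
    rw [hm, hd]

theorem pvC_succ (m : Nat) : pvC (m + 1) = pvC m + (if pvG m then 1 else 0) := by
  simp [pvC, List.range_succ, List.countP_append, List.countP_singleton]

theorem pvC_mul5 (q : Nat) : pvC (5 * q) = 4 * pvC q := by
  induction q with
  | zero => simp [pvC]
  | succ k ih =>
    have g0 : pvG (5 * k) = ((decide ((0:Nat) ≠ 2)) && pvG k) := by
      simpa using pvG_digit k 0 (by omega)
    have g1 := pvG_digit k 1 (by omega)
    have g2 := pvG_digit k 2 (by omega)
    have g3 := pvG_digit k 3 (by omega)
    have g4 := pvG_digit k 4 (by omega)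
    have h0' : pvC (5 * k + 1) = pvC (5 * k) + (if pvG (5 * k) then 1 else 0) := pvC_succ (5 * k)
    have h1 : pvC (5 * k + 2) = pvC (5 * k + 1) + (if pvG (5 * k + 1) then 1 else 0) := by
      rw [show 5 * k + 2 = 5 * k + 1 + 1 from by omega]; exact pvC_succ _
    have h2 : pvC (5 * k + 3) = pvC (5 * k + 2) + (if pvG (5 * k + 2) then 1 else 0) := by
      rw [show 5 * k + 3 = 5 * k + 2 + 1 from by omega]; exact pvC_succ _
    have h3 : pvC (5 * k + 4) = pvC (5 * k + 3) + (if pvG (5 * k + 3) then 1 else 0) := by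
      rw [show 5 * k + 4 = 5 * k + 3 + 1 from by omega]; exact pvC_succ _
    have h4 : pvC (5 * k + 5) = pvC (5 * k + 4) + (if pvG (5 * k + 4) then 1 else 0) := by
      rw [show 5 * k + 5 = 5 * k + 4 + 1 from by omega]; exact pvC_succ _
    have hs : pvC (k + 1) = pvC k + (if pvG k then 1 else 0) := pvC_succ k
    rw [show 5 * (k + 1) = 5 * k + 5 from by omega]
    cases hg : pvG k <;>
      simp only [g0, g1, g2, g3, g4, hg, Bool.and_false, Bool.and_true] at h0' h1 h2 h3 h4 hs <;>
      simp at h0' h1 h2 h3 h4 hs <;>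
      omega

-- contribution of the last partial block: count of b < d with b ≠ 2
def pvCnt (d : Nat) : Nat := (List.range d).countP (fun b => decide (b ≠ 2))

theorem pvC_block (q d : Nat) (hd : d < 5) :
    pvC (5 * q + d) = 4 * pvC q + (if pvG q then pvCnt d else 0) := by
  induction d with
  | zero => simpa [pvCnt] using pvC_mul5 q
  | succ k ih =>
    have hk : k < 5 := by omega
    have hstep : pvC (5 * q + (k + 1)) = pvC (5 * q + k) + (if pvG (5 * q + k) then 1 else 0) := by
      rw [show 5 * q + (k + 1) = (5 * q + k) + 1 from by omega]; exact pvC_succ _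
    have hcnt : pvCnt (k + 1) = pvCnt k + (if k = 2 then 0 else 1) := by
      by_cases h2 : k = 2 <;>
        simp [pvCnt, List.range_succ, List.countP_append, List.countP_singleton, h2]
    rw [hstep, ih hk, pvG_digit q k hk, hcnt]
    cases h : pvG q <;> by_cases h2 : k = 2 <;>
      first
        | omega
        | (simp [h2]; omega)
        | simp [h2]

-- floordiv / mod of a positive int by 5 agree with Nat division on toNat
theorem pv_div5 (x : Int) (hx : 0 < x) :
    PySem.Int.floordiv x 5 = ((x.toNat / 5 : Nat) : Int) ∧
    PySem.Int.mod x 5 = ((x.toNat % 5 : Nat) : Int) := by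
  have hx' : x = ((x.toNat : Nat) : Int) := by omega
  rw [hx']
  exact ⟨by exact_mod_cast PySem.Int.floordiv_natCast x.toNat 5,
         by exact_mod_cast PySem.Int.mod_natCast x.toNat 5⟩

-- B's good agrees with pvG on nonnegative inputs
theorem pvGood_eq (x : Int) (hx : 0 ≤ x) : pvGood x = pvG x.toNat := by
  by_cases h0 : x = 0
  · subst h0; simp [pvGood, pvG]
  · have hx' : 0 < x := by omega
    rw [pvGood]
    obtain ⟨hd, hm⟩ := pv_div5 x hx'
    have ih := pvGood_eq (PySem.Int.floordiv x 5) (by rw [hd]; positivity)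
    rw [pvG]
    have hne : ¬ x ≤ 0 := by omega
    have hnz : x.toNat ≠ 0 := by omega
    simp only [hne, dif_neg, not_false_iff, hnz, if_neg]
    rw [ih, hd, hm]
    have : ((x.toNat / 5 : Nat) : Int).toNat = x.toNat / 5 := by omega
    rw [this]
    congr 1
    simp only [decide_eq_decide]
    omega
termination_by x.toNat
decreasing_by
  obtain ⟨hd, _⟩ := pv_div5 x (by omega)
  rw [hd]; omega

-- A's while-loop result: it ends at 0 exactly on nonnegative no-digit-2 inputs
theorem pvADrop_zero (i : Int) : (pvADrop i = 0) ↔ (0 ≤ i ∧ pvG i.toNat = true) := by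
  by_cases h0 : 0 < i
  · rw [pvADrop, dif_pos h0]
    obtain ⟨hd, hm⟩ := pv_div5 i h0
    have hnz : i.toNat ≠ 0 := by omega
    rw [show pvG i.toNat = ((decide (i.toNat % 5 ≠ 2)) && pvG (i.toNat / 5)) from by
      rw [pvG, if_neg hnz]]
    by_cases hm2 : PySem.Int.mod i 5 ≠ 2
    · have ih := pvADrop_zero (PySem.Int.floordiv i 5)
      have hmn : (i.toNat % 5) ≠ 2 := by
        intro hc; apply hm2; rw [hm, hc]; rfl
      have ht : ((i.toNat / 5 : Nat) : Int).toNat = i.toNat / 5 := by omega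
      rw [if_pos hm2, ih, hd, ht]
      simp [hmn, h0.le]
      intro _
      omega
    · rw [if_neg hm2]
      have hmn : (i.toNat % 5) = 2 := by
        have : PySem.Int.mod i 5 = 2 := by omega
        rw [hm] at this; omega
      simp [hmn]
      omega
  · rw [pvADrop, dif_neg h0]
    constructor
    · intro h; subst h; exact ⟨le_refl 0, pvG_zero⟩
    · intro ⟨h1, _⟩; omega
termination_by i.toNat
decreasing_by
  obtain ⟨hd, _⟩ := pv_div5 i (by omega)
  rw [hd]; omega

-- B's f computes pvC on nonnegative inputs
theorem pvF_eq (x : Int) (hx : 0 ≤ x) : pvF x = ((pvC x.toNat : Nat) : Int) := by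
  by_cases h0 : x ≤ 0
  · have : x = 0 := by omega
    subst this; simp [pvF, pvC]
  · have hx' : 0 < x := by omega
    rw [pvF]
    obtain ⟨hd, hm⟩ := pv_div5 x hx'
    have hqn : (0:Int) ≤ PySem.Int.floordiv x 5 := by rw [hd]; positivity
    have ih := pvF_eq (PySem.Int.floordiv x 5) hqn
    simp only [h0, dif_neg, not_false_iff]
    rw [ih, pvGood_eq _ hqn, hd, hm]
    have ht : ((x.toNat / 5 : Nat) : Int).toNat = x.toNat / 5 := by omega
    rw [ht]
    have hsplit : x.toNat = 5 * (x.toNat / 5) + x.toNat % 5 := by omega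
    rw [show pvC x.toNat = pvC (5 * (x.toNat / 5) + x.toNat % 5) from by rw [← hsplit]]
    rw [pvC_block (x.toNat / 5) (x.toNat % 5) (by omega)]
    have c0 : pvCnt 0 = 0 := by decide
    have c1 : pvCnt 1 = 1 := by decide
    have c2 : pvCnt 2 = 2 := by decide
    have c3 : pvCnt 3 = 2 := by decide
    have c4 : pvCnt 4 = 3 := by decide
    have hr : x.toNat % 5 = 0 ∨ x.toNat % 5 = 1 ∨ x.toNat % 5 = 2 ∨ x.toNat % 5 = 3 ∨ x.toNat % 5 = 4 := by omega
    rcases hr with h | h | h | h | h <;>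
      rw [h] <;>
      cases hg : pvG (x.toNat / 5) <;>
      simp [PySem.List.pyGet?, PySem.List.pyIdx?, c0, c1, c2, c3, c4] <;>
      push_cast <;> ring
termination_by x.toNat
decreasing_by
  obtain ⟨hd, _⟩ := pv_div5 x (by omega)
  rw [hd]; omega

-- A's fold over range(l-1, r) counts pvC between the clamped endpoints
theorem pv_fold_count (a b : Int) (acc : Int) :
    (PySem.List.pyRange a b 1).foldl
      (fun answer i => if pvADrop i = 0 then answer + 1 else answer) acc =
    acc + ((pvC (max b (max a 0)).toNat : Nat) : Int) - ((pvC (max a 0).toNat : Nat) : Int) := by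
  by_cases hab : b ≤ a
  · rw [PySem.List.pyRange_one_eq_nil hab]
    have : max b (max a 0) = max a 0 := by omega
    rw [this]; simp
  · have hab' : a < b := by omega
    rw [PySem.List.pyRange_one_cons hab']
    simp only [List.foldl_cons]
    rw [pv_fold_count (a + 1) b]
    have hmb : max b (max (a+1) 0) = max b (max a 0) := by omega
    rw [hmb]
    by_cases ha : 0 ≤ a
    · have h1 : (max a 0) = a := by omega
      have h2 : (max (a+1) 0) = a + 1 := by omega
      have h3 : (a+1).toNat = a.toNat + 1 := by omega
      rw [h1, h2, h3, pvC_succ]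
      by_cases hg : pvADrop a = 0
      · have := (pvADrop_zero a).mp hg
        rw [if_pos hg, if_pos this.2]
        push_cast; ring
      · have hng : ¬ (pvG a.toNat = true) := by
          intro hc; exact hg ((pvADrop_zero a).mpr ⟨ha, hc⟩)
        rw [if_neg hg, if_neg hng]
        push_cast; ring
    · have h1 : (max a 0) = 0 := by omega
      have h2 : (max (a+1) 0) = 0 := by omega
      have hng : pvADrop a ≠ 0 := by
        intro hc; have := (pvADrop_zero a).mp hc; omega
      rw [h1, h2, if_neg hng]
termination_by (b - a).toNat
decreasing_by omega

-- ===== VERDICT (by name: the statement is the Claim_ definition above) =====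
theorem solution_spec : Claim_equal_solution := by
  intro n l r _
  show solution n l r = pvF (max r (max (l - 1) 0)) - pvF (max (l - 1) 0)
  unfold solution
  rw [pv_fold_count (l - 1) r 0]
  have hlo : (0:Int) ≤ max (l - 1) 0 := by omega
  have hhi : (0:Int) ≤ max r (max (l - 1) 0) := by omega
  rw [pvF_eq _ hhi, pvF_eq _ hlo]
  ring
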